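-- pv_equiv track=rewrite | github.com/AlphaZero28/image2txt | imgProcessing.py | bounding_horizontal_rect
-- ===== SOURCE A (Python) =====
-- def bounding_horizontal_rect(hist_data):
--     ''' returns the initial and final y axis point of each line'''
--     bounding_horizontal_rect = []
--     valp = 0
--     pos1 = 0
--     thresh_val = 0
--
--     for i, val in enumerate(hist_data):
--         if val > thresh_val and valp <= thresh_val:
--             pos1 = i-1
--
--         elif (not i == 0) and val <= thresh_val and valp > thresh_val:
--             if (i-pos1) > 2:
--                 bounding_horizontal_rect.append((pos1, i+1))
--         valp = val
--
--     return bounding_horizontal_rect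
-- ===== SOURCE B (Python) =====
-- def bounding_horizontal_rect(hist_data):
--     '''returns the initial and final y axis point of each line (run-grouping rewrite)'''
--     res = []
--     i, n = 0, len(hist_data)
--     while i < n:
--         if hist_data[i] <= 0:
--             i += 1
--         else:
--             j = i
--             while j < n and hist_data[j] > 0:
--                 j += 1
--             if j < n and j - i >= 2:
--                 res.append((i - 1, j + 1))
--             i = j
--     return res
-- ===== Notes on version B (the rewrite author's own statement) =====
-- stated objective: simpler
-- what changed: Replaced the single-pass previous-value edge-detection state machine by an explicit two-level scan that groups the histogram into maximal positive runs and emits (start-1, end+1) for each closed run of length >= 2.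
import Mathlib
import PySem

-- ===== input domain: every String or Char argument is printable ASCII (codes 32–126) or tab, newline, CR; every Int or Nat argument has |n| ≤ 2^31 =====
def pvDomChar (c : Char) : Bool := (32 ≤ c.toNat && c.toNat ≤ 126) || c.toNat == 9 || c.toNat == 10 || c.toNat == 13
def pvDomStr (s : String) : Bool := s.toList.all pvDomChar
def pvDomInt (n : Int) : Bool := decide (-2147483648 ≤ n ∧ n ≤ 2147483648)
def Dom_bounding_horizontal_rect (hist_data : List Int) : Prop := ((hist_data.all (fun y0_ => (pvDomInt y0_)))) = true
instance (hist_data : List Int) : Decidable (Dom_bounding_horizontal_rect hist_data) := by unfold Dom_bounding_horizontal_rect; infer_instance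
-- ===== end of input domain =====

-- B replaces A's previous-value edge-detection scan by explicit grouping into maximal
-- positive runs (simpler decomposition; same O(n) cost).

-- ===== PORT A =====
-- literal port of A's loop body: state = (result list, valp, pos1), input = (i, val)
def pvStepA (st : List (Int × Int) × Int × Int) (q : Int × Int) : List (Int × Int) × Int × Int :=
  let acc := st.1; let valp := st.2.1; let pos1 := st.2.2
  let i := q.1; let val := q.2
  if val > 0 ∧ valp ≤ 0 then (acc, val, i - 1)
  else if ¬ i = 0 ∧ val ≤ 0 ∧ valp > 0 then
    (if i - pos1 > 2 then acc ++ [(pos1, i + 1)] else acc, val, pos1)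
  else (acc, val, pos1)

def bounding_horizontal_rect (hist_data : List Int) : List (Int × Int) :=
  ((PySem.List.enumerate hist_data).foldl pvStepA ([], 0, 0)).1

-- ===== PORT B =====
-- Source B's inner `while j < n and hist_data[j] > 0` = length of the positive prefix
def pvLenPos : List Int → Nat
  | [] => 0
  | x :: xs => if x > 0 then pvLenPos xs + 1 else 0

-- Source B's outer while loop over the remaining suffix, i = absolute index of its head
def pvAltGo : List Int → Int → List (Int × Int)
  | [], _ => []
  | x :: xs, i =>
      if x ≤ 0 then pvAltGo xs (i + 1)
      else
        let rest := xs.drop (pvLenPos xs)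
        (if rest ≠ [] ∧ (1 + (pvLenPos xs : Int)) ≥ 2 then
            [(i - 1, i + (1 + (pvLenPos xs : Int)) + 1)] else []) ++
          pvAltGo rest (i + (1 + (pvLenPos xs : Int)))
termination_by xs _ => xs.length
decreasing_by
  · simp
  · simp only [List.length_drop, List.length_cons]; omega

def bounding_horizontal_rect_alt (hist_data : List Int) : List (Int × Int) :=
  pvAltGo hist_data 0

-- ===== PRECONDITION & SPEC =====
def Spec_bounding_horizontal_rect (hist_data : List Int) (out : List (Int × Int)) : Prop := out = bounding_horizontal_rect_alt hist_data
instance (hist_data : List Int) (out : List (Int × Int)) : Decidable (Spec_bounding_horizontal_rect hist_data out) := by unfold Spec_bounding_horizontal_rect; infer_instance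

-- ===== CLAIM (what is proved, stated in full; the proofs are below) =====
def Claim_equal_bounding_horizontal_rect : Prop := ∀ (hist_data : List Int), Dom_bounding_horizontal_rect hist_data → Spec_bounding_horizontal_rect hist_data (bounding_horizontal_rect hist_data)

-- ===== LEMMAS AND PROOFS =====

-- two-state machine characterising A's scan: pvGo0 = "previous value ≤ 0", pvGo1 = "inside a run, pos1 = p"
mutual
def pvGo0 : List Int → Int → List (Int × Int)
  | [], _ => []
  | x :: xs, i => if x > 0 then pvGo1 xs (i + 1) (i - 1) else pvGo0 xs (i + 1)
def pvGo1 : List Int → Int → Int → List (Int × Int)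
  | [], _, _ => []
  | x :: xs, i, p =>
      if x ≤ 0 then
        (if i - p > 2 then (p, i + 1) :: pvGo0 xs (i + 1) else pvGo0 xs (i + 1))
      else pvGo1 xs (i + 1) p
end

theorem pvFoldA (xs : List Int) : ∀ (i : Int) (acc : List (Int × Int)) (valp p : Int),
    0 ≤ i → (valp > 0 → 1 ≤ i) →
    ((PySem.List.enumerate xs i).foldl pvStepA (acc, valp, p)).1
      = acc ++ (if valp > 0 then pvGo1 xs i p else pvGo0 xs i) := by
  induction xs with
  | nil =>
    intro i acc valp p _ _
    simp only [PySem.List.enumerate_nil, List.foldl_nil]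
    split_ifs <;> simp [pvGo0, pvGo1]
  | cons x xs ih =>
    intro i acc valp p h0 h1
    rw [PySem.List.enumerate_cons, List.foldl_cons]
    by_cases hx : x > 0 <;> by_cases hv : valp > 0
    · -- x>0, valp>0 : third branch, stay in run
      have hs : pvStepA (acc, valp, p) (i, x) = (acc, x, p) := by
        simp [pvStepA, show ¬ (x > 0 ∧ valp ≤ 0) by omega, show ¬ (¬ i = 0 ∧ x ≤ 0 ∧ valp > 0) by omega]
      rw [hs, ih (i + 1) acc x p (by omega) (by omega)]
      simp [pvGo1, hx, hv, show ¬ x ≤ 0 by omega]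
    · -- x>0, valp≤0 : rising edge
      have hs : pvStepA (acc, valp, p) (i, x) = (acc, x, i - 1) := by
        simp [pvStepA, show (x > 0 ∧ valp ≤ 0) by omega]
      rw [hs, ih (i + 1) acc x (i - 1) (by omega) (by omega)]
      simp [pvGo0, hx, hv]
    · -- x≤0, valp>0 : falling edge
      by_cases hc : i - p > 2
      · have hs : pvStepA (acc, valp, p) (i, x) = (acc ++ [(p, i + 1)], x, p) := by
          simp [pvStepA, show ¬ (x > 0 ∧ valp ≤ 0) by omega,
            show (¬ i = 0 ∧ x ≤ 0 ∧ valp > 0) from ⟨by omega, by omega, hv⟩, hc]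
        rw [hs, ih (i + 1) (acc ++ [(p, i + 1)]) x p (by omega) (by omega)]
        simp [pvGo1, hv, show x ≤ 0 by omega, hc]
      · have hs : pvStepA (acc, valp, p) (i, x) = (acc, x, p) := by
          simp [pvStepA, show ¬ (x > 0 ∧ valp ≤ 0) by omega,
            show (¬ i = 0 ∧ x ≤ 0 ∧ valp > 0) from ⟨by omega, by omega, hv⟩, hc]
        rw [hs, ih (i + 1) acc x p (by omega) (by omega)]
        simp [pvGo1, hv, show x ≤ 0 by omega, hc]
    · -- x≤0, valp≤0 : nothing
      have hs : pvStepA (acc, valp, p) (i, x) = (acc, x, p) := by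
        simp [pvStepA, show ¬ (x > 0 ∧ valp ≤ 0) by omega, show ¬ (¬ i = 0 ∧ x ≤ 0 ∧ valp > 0) by omega]
      rw [hs, ih (i + 1) acc x p (by omega) (by omega)]
      simp [pvGo0, hv, show ¬ x > 0 by omega]

theorem pvGo1_char (xs : List Int) : ∀ (i p : Int),
    pvGo1 xs i p =
      (if xs.drop (pvLenPos xs) ≠ [] ∧ i + (pvLenPos xs : Int) - p > 2 then
          [(p, i + (pvLenPos xs : Int) + 1)] else []) ++
        pvGo0 (xs.drop (pvLenPos xs)) (i + (pvLenPos xs : Int)) := by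
  induction xs with
  | nil => intro i p; simp [pvGo1, pvLenPos, pvGo0]
  | cons x xs ih =>
    intro i p
    by_cases hx : x ≤ 0
    · have hl : pvLenPos (x :: xs) = 0 := by simp [pvLenPos, show ¬ x > 0 by omega]
      rw [hl]
      simp only [List.drop_zero, Nat.cast_zero, add_zero]
      by_cases hc : i - p > 2
      · simp [pvGo1, hx, hc, pvGo0, show ¬ x > 0 by omega]
      · simp [pvGo1, hx, hc, pvGo0, show ¬ x > 0 by omega]
    · have hl : pvLenPos (x :: xs) = pvLenPos xs + 1 := by
        simp [pvLenPos, show x > 0 by omega]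
      rw [hl]
      have hd : (x :: xs).drop (pvLenPos xs + 1) = xs.drop (pvLenPos xs) := by simp
      rw [hd]
      have hgo : pvGo1 (x :: xs) i p = pvGo1 xs (i + 1) p := by simp [pvGo1, hx]
      rw [hgo, ih (i + 1) p]
      have e1 : i + 1 + (pvLenPos xs : Int) = i + ((pvLenPos xs : Nat) + 1 : Nat) := by
        push_cast; ring
      rw [e1]

theorem pvAltGo_eq_go0 (xs : List Int) (i : Int) : pvAltGo xs i = pvGo0 xs i := by
  induction xs, i using pvAltGo.induct with
  | case1 => simp [pvAltGo, pvGo0]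
  | case2 x xs i hx ih =>
    rw [pvAltGo]
    simp only [hx, if_true]
    rw [ih]
    simp [pvGo0, show ¬ x > 0 by omega]
  | case3 x xs i hx rest ih =>
    rw [pvAltGo]
    simp only [hx, if_false]
    rw [show pvGo0 (x :: xs) i = pvGo1 xs (i + 1) (i - 1) from by
      simp [pvGo0, show x > 0 by omega]]
    rw [pvGo1_char, ih]
    have e0 : i + 1 + (pvLenPos xs : Int) = i + (1 + (pvLenPos xs : Int)) := by ring
    by_cases hr : xs.drop (pvLenPos xs) = [] <;>
      by_cases h2 : (1 : Int) + (pvLenPos xs : Int) ≥ 2 <;>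
      simp [rest, hr, h2, e0]

-- ===== VERDICT (by name: the statement is the Claim_ definition above) =====
theorem bounding_horizontal_rect_spec : Claim_equal_bounding_horizontal_rect := by
  intro hist _
  unfold Spec_bounding_horizontal_rect bounding_horizontal_rect bounding_horizontal_rect_alt
  rw [pvFoldA hist 0 [] 0 0 (by omega) (by omega)]
  simp [pvAltGo_eq_go0]
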